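-- pv_equiv track=rewrite | github.com/vSteps/Python | Codeforces/Lista 10/progressoes.aritmeticas.py | numero_minimo_partes_progressoes_aritmeticas
-- ===== SOURCE A (Python) =====
-- def eh_progressao_aritmetica(subsequencia):
--     if len(subsequencia) <= 2:
--         return True
--
--     diff = subsequencia[1] - subsequencia[0]
--     for i in range(2, len(subsequencia)):
--         if subsequencia[i] - subsequencia[i - 1] != diff:
--             return False
--
--     return True
--
-- def numero_minimo_partes_progressoes_aritmeticas(sequencia):
--     numero_partes = 1
--     subsequencia_atual = [sequencia[0]]
--
--     for i in range(1, len(sequencia)):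
--         subsequencia_atual.append(sequencia[i])
--
--         if not eh_progressao_aritmetica(subsequencia_atual):
--             numero_partes += 1
--             subsequencia_atual = [sequencia[i]]
--
--     return numero_partes
-- ===== SOURCE B (Python) =====
-- def numero_minimo_partes_progressoes_aritmeticas(sequencia):
--     partes = 1
--     prev = sequencia[0]
--     tam = 1
--     diff = 0
--     for x in sequencia[1:]:
--         if tam == 1:
--             diff = x - prev
--             tam = 2
--         elif x - prev == diff:
--             tam += 1
--         else:
--             partes += 1
--             tam = 1
--         prev = x
--     return partes
-- ===== Notes on version B (the rewrite author's own statement) =====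
-- stated objective: faster
-- what changed: Single pass keeping only the current segment's length, last element and common difference (O(1) per element), instead of re-scanning the whole growing segment with eh_progressao_aritmetica at every step.
import Mathlib
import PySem

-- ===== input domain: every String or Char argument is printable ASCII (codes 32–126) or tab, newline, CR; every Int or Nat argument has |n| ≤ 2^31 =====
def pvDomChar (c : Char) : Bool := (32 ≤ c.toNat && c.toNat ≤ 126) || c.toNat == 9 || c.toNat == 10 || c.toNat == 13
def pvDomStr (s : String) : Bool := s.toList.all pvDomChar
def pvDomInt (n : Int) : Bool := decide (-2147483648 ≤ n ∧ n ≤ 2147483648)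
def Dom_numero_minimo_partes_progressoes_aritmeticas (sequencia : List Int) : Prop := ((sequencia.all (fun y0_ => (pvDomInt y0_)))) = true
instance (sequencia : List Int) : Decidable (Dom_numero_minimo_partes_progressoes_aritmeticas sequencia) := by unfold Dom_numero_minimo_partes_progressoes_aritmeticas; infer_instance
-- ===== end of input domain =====

-- B replaces A's quadratic re-check of the whole current segment by an O(1)-per-element
-- single pass tracking the segment's length, last element and common difference (objective: faster).

-- ===== PORT A =====
-- the loop 'for i in range(2, len): if sub[i] - sub[i-1] != diff: return False' with prev = sub[i-1]
def ehPAcheck (diff prev : Int) : List Int → Bool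
  | [] => true
  | x :: rest => if x - prev ≠ diff then false else ehPAcheck diff x rest

-- eh_progressao_aritmetica: len ≤ 2 → True (the loop from index 2 is then empty), else diff = l[1]-l[0]
def ehPA : List Int → Bool
  | a :: b :: rest => ehPAcheck (b - a) b rest
  | _ => true

-- one iteration of A's loop body: append sequencia[i], split on eh_progressao_aritmetica
def stepA (st : Int × List Int) (x : Int) : Int × List Int :=
  let sub := st.2 ++ [x]
  if ¬ ehPA sub then (st.1 + 1, [x]) else (st.1, sub)

-- sequencia[0] raises IndexError on []: excluded by Pre_; the [] branch value is arbitrary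
def numero_minimo_partes_progressoes_aritmeticas (sequencia : List Int) : Int :=
  match sequencia with
  | [] => 0
  | s0 :: rest => (rest.foldl stepA (1, [s0])).1

-- ===== PORT B =====
-- one iteration of B's loop: state (partes, tam, diff, prev)
def stepB (st : Int × Int × Int × Int) (x : Int) : Int × Int × Int × Int :=
  match st with
  | (p, tam, diff, prev) =>
    if tam = 1 then (p, 2, x - prev, x)
    else if x - prev = diff then (p, tam + 1, diff, x)
    else (p + 1, 1, diff, x)

def numero_minimo_partes_progressoes_aritmeticas_alt (sequencia : List Int) : Int :=
  match sequencia with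
  | [] => 0
  | s0 :: rest => (rest.foldl stepB (1, 1, 0, s0)).1

-- ===== PRECONDITION & SPEC =====
-- A (and B) evaluate sequencia[0] first, which raises IndexError on the empty list.
def Pre_numero_minimo_partes_progressoes_aritmeticas (sequencia : List Int) : Prop := sequencia ≠ []
instance (sequencia : List Int) : Decidable (Pre_numero_minimo_partes_progressoes_aritmeticas sequencia) := by unfold Pre_numero_minimo_partes_progressoes_aritmeticas; infer_instance
def pvWitness_numero_minimo_partes_progressoes_aritmeticas : List Int := [1, 3, 5, 2]

def Spec_numero_minimo_partes_progressoes_aritmeticas (sequencia : List Int) (out : Int) : Prop := out = numero_minimo_partes_progressoes_aritmeticas_alt sequencia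
instance (sequencia : List Int) (out : Int) : Decidable (Spec_numero_minimo_partes_progressoes_aritmeticas sequencia out) := by unfold Spec_numero_minimo_partes_progressoes_aritmeticas; infer_instance

-- ===== CLAIM (what is proved, stated in full; the proofs are below) =====
def Claim_equal_numero_minimo_partes_progressoes_aritmeticas : Prop := ∀ (sequencia : List Int), Dom_numero_minimo_partes_progressoes_aritmeticas sequencia → Pre_numero_minimo_partes_progressoes_aritmeticas sequencia → Spec_numero_minimo_partes_progressoes_aritmeticas sequencia (numero_minimo_partes_progressoes_aritmeticas sequencia)

-- ===== LEMMAS AND PROOFS =====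

-- appending one element to the scanned tail only adds one final comparison
theorem ehPAcheck_append (d x : Int) (l : List Int) : ∀ p : Int,
    ehPAcheck d p (l ++ [x]) = (ehPAcheck d p l && decide (x - l.getLastD p = d)) := by
  induction l with
  | nil => intro p; by_cases h : x - p = d <;> simp [ehPAcheck, h]
  | cons y t ih =>
      intro p
      simp only [List.cons_append, ehPAcheck, List.getLastD_cons]
      by_cases h : y - p ≠ d <;> simp [h, ih y]

-- the invariant tying A's state (partes, current segment) to B's (partes, tam, diff, prev)
def InvAB (sA : Int × List Int) (sB : Int × Int × Int × Int) : Prop :=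
  sA.1 = sB.1 ∧
  ((sB.2.1 = 1 ∧ sA.2 = [sB.2.2.2]) ∨
   (2 ≤ sB.2.1 ∧ ∃ a b rest, sA.2 = a :: b :: rest ∧ sB.2.2.1 = b - a ∧
      sB.2.2.2 = rest.getLastD b ∧ ehPAcheck (b - a) b rest = true))

theorem stepAB (sA : Int × List Int) (sB : Int × Int × Int × Int) (x : Int)
    (h : InvAB sA sB) : InvAB (stepA sA x) (stepB sB x) := by
  obtain ⟨sAp, sAl⟩ := sA
  obtain ⟨p, tam, diff, prev⟩ := sB
  obtain ⟨hp, hcase⟩ := h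
  simp only at hp
  rcases hcase with ⟨htam, hsub⟩ | ⟨htam, a, b, rest, hsub, hdiff, hprev, hchk⟩
  · -- current segment has one element: appending always keeps an AP
    simp only at htam hsub
    subst hp htam hsub
    simp only [stepA, stepB, ehPA]
    norm_num
    refine ⟨rfl, Or.inr ⟨by norm_num, prev, x, [], rfl, rfl, rfl, rfl⟩⟩
  · -- segment a::b::rest is an AP with difference b-a; only the last comparison matters
    simp only at htam hsub hdiff hprev hchk
    have htam' : tam ≠ 1 := by omega
    subst hp hsub hdiff hprev
    have hApa : ehPA ((a :: b :: rest) ++ [x]) = decide (x - rest.getLastD b = b - a) := by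
      simp [ehPA, ehPAcheck_append, hchk]
    by_cases hx : x - rest.getLastD b = b - a
    · -- still an AP: both keep counting and extend
      simp only [stepA, hApa, hx, decide_true, not_true_eq_false, if_false, stepB,
        if_neg htam', if_pos hx, if_true]
      refine ⟨rfl, Or.inr ⟨show (2:Int) ≤ tam + 1 by omega, a, b, rest ++ [x], rfl, rfl,
        (List.getLastD_concat ..).symm, ?_⟩⟩
      · rw [ehPAcheck_append, List.getLastD_eq_getLast?] at *; simp [hchk, hx]
    · -- break: both start a fresh one-element segment
      simp only [stepA, hApa, hx, decide_false, not_false_eq_true, if_true, stepB,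
        if_neg htam', if_neg hx]
      exact ⟨rfl, Or.inl ⟨rfl, rfl⟩⟩

theorem foldAB (l : List Int) : ∀ sA sB, InvAB sA sB →
    (l.foldl stepA sA).1 = (l.foldl stepB sB).1 := by
  induction l with
  | nil => intro sA sB h; exact h.1
  | cons x t ih => intro sA sB h; exact ih _ _ (stepAB sA sB x h)

-- ===== VERDICT (by name: the statement is the Claim_ definition above) =====
theorem numero_minimo_partes_progressoes_aritmeticas_spec : Claim_equal_numero_minimo_partes_progressoes_aritmeticas := by
  intro sequencia _ hpre
  unfold Spec_numero_minimo_partes_progressoes_aritmeticas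
  match sequencia with
  | [] => exact absurd rfl hpre
  | s0 :: rest =>
      simp only [numero_minimo_partes_progressoes_aritmeticas,
        numero_minimo_partes_progressoes_aritmeticas_alt]
      exact (foldAB rest (1, [s0]) (1, 1, 0, s0) ⟨rfl, Or.inl ⟨rfl, rfl⟩⟩)
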